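-- pv_equiv track=rewrite | github.com/devangrajarora/foobar-20 | Level 3/bomb-baby.py | solve
-- ===== SOURCE A (Python) =====
-- def solve(n,m):
--     if n <= 0 or m <= 0:
--         return -1
--     elif n == 1 and m == 1:
--         return 0
--     elif n == m:
--         return -1
--
--     if n < m:
--         n,m = m,n
--
--     if m == 1:
--         return n - 1
--
--     if n % m == 0:
--         return -1
--
--     small = solve(n%m,m)
--
--     if small == -1:
--         return -1
--     else:
--         return int(n/m) + small
-- ===== SOURCE B (Python) =====
-- def solve(n, m):
--     # Iterative re-implementation: explicit while-loop with a step counter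
--     # instead of A's recursion (and integer // instead of int(n/m), which
--     # agree for the positive operands reachable here).
--     if n <= 0 or m <= 0:
--         return -1
--     count = 0
--     while True:
--         if n < m:
--             n, m = m, n
--         if n == 1 and m == 1:
--             return count
--         if n == m:
--             return -1
--         if m == 1:
--             return count + n - 1
--         if n % m == 0:
--             return -1
--         count += n // m
--         n = n % m
-- ===== Notes on version B (the rewrite author's own statement) =====
-- stated objective: simpler
-- what changed: Replaces A's recursion (with a post-hoc -1 propagation and a separate base-case ladder re-checked on every call) by a single explicit while-loop that accumulates the step counter; uses n//m instead of int(n/m) (equal on the reachable positive operands within the domain).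
import Mathlib
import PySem

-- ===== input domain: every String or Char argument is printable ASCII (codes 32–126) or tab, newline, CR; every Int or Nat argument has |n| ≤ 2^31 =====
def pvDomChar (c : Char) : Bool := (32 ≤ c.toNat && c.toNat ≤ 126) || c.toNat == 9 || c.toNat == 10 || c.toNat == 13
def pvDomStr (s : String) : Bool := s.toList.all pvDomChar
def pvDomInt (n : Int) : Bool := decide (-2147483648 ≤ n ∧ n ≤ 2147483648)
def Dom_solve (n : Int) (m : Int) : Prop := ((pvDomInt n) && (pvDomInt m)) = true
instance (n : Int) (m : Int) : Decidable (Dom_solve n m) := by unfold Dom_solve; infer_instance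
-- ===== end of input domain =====

-- B replaces A's recursion (-1 propagated back up the call chain) by one explicit
-- counting loop; same return value everywhere, different decomposition (objective: simpler).
-- Both ports carry a Nat fuel purely as a totality guard (one unit per recursive call /
-- loop iteration; (n+m).toNat+1 units are more than the call depth, so the 0-fuel
-- branch is never reached).

-- ===== PORT A =====
-- int(n/m) is ported as Int.tdiv (truncating division): on the operands reachable here
-- (0 < m < n ≤ 2^31) Python's float division truncates to exactly that value.
def solveFuel : Nat → Int → Int → Int
  | 0, _, _ => -1  -- fuel exhausted: unreachable for the fuel solve supplies
  | fuel+1, n, m =>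
    if n ≤ 0 ∨ m ≤ 0 then -1
    else if n = 1 ∧ m = 1 then 0
    else if n = m then -1
    else
      let nn := if n < m then m else n
      let mm := if n < m then n else m
      if mm = 1 then nn - 1
      else if PySem.Int.mod nn mm = 0 then -1
      else
        let small := solveFuel fuel (PySem.Int.mod nn mm) mm
        if small = -1 then -1 else nn.tdiv mm + small

def solve (n : Int) (m : Int) : Int := solveFuel ((n + m).toNat + 1) n m

-- ===== PORT B =====
-- the body of Source B's 'while True' loop, one fuel unit per iteration
def solveGoFuel : Nat → Int → Int → Int → Int
  | 0, _, _, _ => -1  -- fuel exhausted: unreachable for the fuel solve_alt supplies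
  | fuel+1, n, m, count =>
    let nn := if n < m then m else n
    let mm := if n < m then n else m
    if nn = 1 ∧ mm = 1 then count
    else if nn = mm then -1
    else if mm = 1 then count + nn - 1
    else if PySem.Int.mod nn mm = 0 then -1
    else solveGoFuel fuel (PySem.Int.mod nn mm) mm (count + PySem.Int.floordiv nn mm)

def solve_alt (n : Int) (m : Int) : Int :=
  if n ≤ 0 ∨ m ≤ 0 then -1
  else solveGoFuel ((n + m).toNat + 1) n m 0

-- ===== PRECONDITION & SPEC =====
def Spec_solve (n : Int) (m : Int) (out : Int) : Prop := out = solve_alt n m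
instance (n : Int) (m : Int) (out : Int) : Decidable (Spec_solve n m out) := by unfold Spec_solve; infer_instance

-- ===== CLAIM (what is proved, stated in full; the proofs are below) =====
def Claim_equal_solve : Prop := ∀ (n : Int) (m : Int), Dom_solve n m → Spec_solve n m (solve n m)

-- ===== LEMMAS AND PROOFS =====
-- A's result is never below -1
theorem solveFuel_neg_one_le (fuel : Nat) : ∀ (n m : Int), -1 ≤ solveFuel fuel n m := by
  induction fuel with
  | zero => intro n m; simp [solveFuel]
  | succ fuel ih =>
    intro n m
    rw [solveFuel]
    by_cases h1 : n ≤ 0 ∨ m ≤ 0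
    · simp [h1]
    · rw [if_neg h1]
      by_cases h2 : n = 1 ∧ m = 1
      · simp [h2]
      · rw [if_neg h2]
        by_cases h3 : n = m
        · simp [h3]
        · rw [if_neg h3]
          by_cases hlt : n < m
          · simp only [if_pos hlt]
            by_cases h4 : n = 1
            · rw [if_pos h4]
              omega
            · rw [if_neg h4]
              by_cases h5 : PySem.Int.mod m n = 0
              · simp [h5]
              · rw [if_neg h5]
                have hrec := ih (PySem.Int.mod m n) n
                have ht : 0 ≤ Int.tdiv m n := Int.tdiv_nonneg (by omega) (by omega)
                by_cases h6 : solveFuel fuel (PySem.Int.mod m n) n = -1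
                · simp [h6]
                · simp only [if_neg h6]
                  omega
          · simp only [if_neg hlt]
            by_cases h4 : m = 1
            · rw [if_pos h4]
              omega
            · rw [if_neg h4]
              by_cases h5 : PySem.Int.mod n m = 0
              · simp [h5]
              · rw [if_neg h5]
                have hrec := ih (PySem.Int.mod n m) m
                have ht : 0 ≤ Int.tdiv n m := Int.tdiv_nonneg (by omega) (by omega)
                by_cases h6 : solveFuel fuel (PySem.Int.mod n m) m = -1
                · simp [h6]
                · simp only [if_neg h6]
                  omega

-- loop invariant: with positive arguments and the same fuel, the loop computes
-- A's answer shifted by the accumulator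
theorem solveGoFuel_eq (fuel : Nat) : ∀ (n m count : Int), 0 < n → 0 < m →
    solveGoFuel fuel n m count =
      if solveFuel fuel n m = -1 then -1 else count + solveFuel fuel n m := by
  induction fuel with
  | zero => intro n m count hn hm; simp [solveGoFuel, solveFuel]
  | succ fuel ih =>
    intro n m count hn hm
    rw [solveGoFuel, solveFuel]
    rw [if_neg (show ¬(n ≤ 0 ∨ m ≤ 0) by omega)]
    by_cases h11 : n = 1 ∧ m = 1
    · rw [if_pos h11]
      obtain ⟨rfl, rfl⟩ : n = 1 ∧ m = 1 := h11
      norm_num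
    · rw [if_neg h11]
      by_cases heq : n = m
      · subst heq
        simp only [lt_irrefl]
        norm_num
        omega
      · rw [if_neg heq]
        by_cases hlt : n < m
        · simp only [if_pos hlt]
          rw [if_neg (show ¬(m = 1 ∧ n = 1) by omega), if_neg (show m ≠ n by omega)]
          by_cases hM1 : n = 1
          · rw [if_pos hM1, if_pos hM1, if_neg (show ¬(m - 1 = -1) by omega)]
            omega
          · rw [if_neg hM1, if_neg hM1]
            by_cases hz : PySem.Int.mod m n = 0
            · rw [if_pos hz, if_pos hz, if_pos rfl]
            · rw [if_neg hz, if_neg hz]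
              have hpos : 0 < PySem.Int.mod m n := by
                rw [PySem.Int.mod_eq_emod_of_pos (by omega)] at hz ⊢
                have := Int.emod_nonneg m (show n ≠ 0 by omega)
                omega
              rw [ih (PySem.Int.mod m n) n _ hpos (by omega)]
              rw [show PySem.Int.floordiv m n = Int.tdiv m n by
                rw [PySem.Int.floordiv_eq_ediv_of_pos (by omega), Int.tdiv_eq_ediv_of_nonneg (by omega)]]
              by_cases hs : solveFuel fuel (PySem.Int.mod m n) n = -1
              · rw [if_pos hs, hs, if_pos rfl, if_pos rfl]
              · rw [if_neg hs, if_neg hs]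
                have hge := solveFuel_neg_one_le fuel (PySem.Int.mod m n) n
                have ht : 1 ≤ Int.tdiv m n := by
                  rw [Int.tdiv_eq_ediv_of_nonneg (by omega)]
                  have : (1 : Int) * n ≤ m := by omega
                  exact (Int.le_ediv_iff_mul_le (by omega)).mpr this
                rw [if_neg (show ¬(Int.tdiv m n + solveFuel fuel (PySem.Int.mod m n) n = -1) by omega)]
                omega
        · simp only [if_neg hlt]
          rw [if_neg (show ¬(n = 1 ∧ m = 1) from h11), if_neg (show n ≠ m from heq)]
          by_cases hM1 : m = 1
          · rw [if_pos hM1, if_pos hM1, if_neg (show ¬(n - 1 = -1) by omega)]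
            omega
          · rw [if_neg hM1, if_neg hM1]
            by_cases hz : PySem.Int.mod n m = 0
            · rw [if_pos hz, if_pos hz, if_pos rfl]
            · rw [if_neg hz, if_neg hz]
              have hpos : 0 < PySem.Int.mod n m := by
                rw [PySem.Int.mod_eq_emod_of_pos (by omega)] at hz ⊢
                have := Int.emod_nonneg n (show m ≠ 0 by omega)
                omega
              rw [ih (PySem.Int.mod n m) m _ hpos (by omega)]
              rw [show PySem.Int.floordiv n m = Int.tdiv n m by
                rw [PySem.Int.floordiv_eq_ediv_of_pos (by omega), Int.tdiv_eq_ediv_of_nonneg (by omega)]]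
              by_cases hs : solveFuel fuel (PySem.Int.mod n m) m = -1
              · rw [if_pos hs, hs, if_pos rfl, if_pos rfl]
              · rw [if_neg hs, if_neg hs]
                have hge := solveFuel_neg_one_le fuel (PySem.Int.mod n m) m
                have ht : 1 ≤ Int.tdiv n m := by
                  rw [Int.tdiv_eq_ediv_of_nonneg (by omega)]
                  have : (1 : Int) * m ≤ n := by omega
                  exact (Int.le_ediv_iff_mul_le (by omega)).mpr this
                rw [if_neg (show ¬(Int.tdiv n m + solveFuel fuel (PySem.Int.mod n m) m = -1) by omega)]
                omega

-- ===== VERDICT (by name: the statement is the Claim_ definition above) =====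
theorem solve_spec : Claim_equal_solve := by
  intro n m _
  unfold Spec_solve solve_alt solve
  by_cases h : n ≤ 0 ∨ m ≤ 0
  · rw [if_pos h, solveFuel, if_pos h]
  · rw [if_neg h, solveGoFuel_eq ((n + m).toNat + 1) n m 0 (by omega) (by omega)]
    split <;> omega
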